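-- pv_equiv track=rewrite | github.com/Imbest188/Telnet-Alarm-Collector | Telnet/Alarm.py | __get_values
-- ===== SOURCE A (Python) =====
-- def __get_values(header='', value_line='') -> dict:
--     result = {}
--     tokens = [x for x in header.split(' ') if x != '']
--
--     for it in range(len(tokens) - 1):
--         start_position = header.find(tokens[it])
--         end_position = header.find(tokens[it + 1])
--         value = value_line[start_position:end_position].strip()
--         result[tokens[it]] = value
--
--     start_position = header.find(tokens[-1])
--     value = value_line[start_position:].strip()
--     result[tokens[-1]] = value
--
--     return result
-- ===== SOURCE B (Python) =====
-- def __get_values(header='', value_line='') -> dict: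
--     tokens = [x for x in header.split(' ') if x != '']
--
--     def pairs(ts):
--         if len(ts) == 1:
--             return [(ts[0], value_line[header.find(ts[0]):].strip())]
--         return [(ts[0], value_line[header.find(ts[0]):header.find(ts[1])].strip())] + pairs(ts[1:])
--
--     return dict(pairs(tokens))
-- ===== Notes on version B (the rewrite author's own statement) =====
-- stated objective: alternative
-- what changed: B replaces A's index loop with in-place dict mutation and a duplicated final-token step by a recursion over the token list that builds the (token, value) association list back-to-front (the base case handles the last token) and converts it with one dict() call.
import Mathlib
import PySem

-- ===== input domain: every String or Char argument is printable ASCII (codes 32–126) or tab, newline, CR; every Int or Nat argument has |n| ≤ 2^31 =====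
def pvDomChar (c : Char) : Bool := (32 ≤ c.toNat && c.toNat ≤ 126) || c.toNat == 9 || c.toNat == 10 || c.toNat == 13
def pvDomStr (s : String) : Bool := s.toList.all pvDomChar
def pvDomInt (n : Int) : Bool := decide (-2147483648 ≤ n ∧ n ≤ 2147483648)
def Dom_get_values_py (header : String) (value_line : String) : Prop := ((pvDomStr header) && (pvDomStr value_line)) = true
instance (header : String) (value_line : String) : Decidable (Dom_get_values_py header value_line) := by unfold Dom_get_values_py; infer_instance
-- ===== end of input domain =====

-- B replaces A's index loop with in-place dict mutation (and its duplicated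
-- final-token code) by a recursion that builds the (token, value) association
-- list and one dict() conversion (objective: alternative decomposition, same cost).

-- ===== PORT A =====
def get_values_py (header : String) (value_line : String) : List (String × String) :=
  let tokens := ((PySem.Str.split? header " ").getD []).filter (fun x => x != "")
  let result : PySem.Dict String String :=
    (PySem.List.pyRange 0 ((tokens.length : Int) - 1) 1).foldl
      (fun result it =>
        let start_position := PySem.Str.find header (PySem.List.pyGetD tokens it "")
        let end_position := PySem.Str.find header (PySem.List.pyGetD tokens (it + 1) "")
        let value := PySem.Str.strip (PySem.Str.slice value_line (some start_position) (some end_position))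
        result.insert (PySem.List.pyGetD tokens it "") value)
      PySem.Dict.empty
  let start_position := PySem.Str.find header (PySem.List.pyGetD tokens (-1) "")
  let value := PySem.Str.strip (PySem.Str.slice value_line (some start_position) none)
  (result.insert (PySem.List.pyGetD tokens (-1) "") value).items

-- ===== PORT B =====
-- helper 'pairs' of Source B: the (token, value) pairs, built by recursion on the token list
def pairsAlt (header : String) (value_line : String) : List String → List (String × String)
  | [] => []   -- Source B raises IndexError here (outside Pre_); the port returns []
  | [t] => [(t, PySem.Str.strip (PySem.Str.slice value_line (some (PySem.Str.find header t)) none))]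
  | t :: t' :: rest =>
      (t, PySem.Str.strip (PySem.Str.slice value_line (some (PySem.Str.find header t))
            (some (PySem.Str.find header t')))) :: pairsAlt header value_line (t' :: rest)

def get_values_py_alt (header : String) (value_line : String) : List (String × String) :=
  let tokens := ((PySem.Str.split? header " ").getD []).filter (fun x => x != "")
  (PySem.Dict.ofList (pairsAlt header value_line tokens)).items

-- ===== PRECONDITION & SPEC =====
-- Pre_ excludes exactly the inputs where the header has no token (all spaces / empty):
-- there A (and B) raise IndexError.
def Pre_get_values_py (header : String) (_value_line : String) : Prop :=
  ((PySem.Str.split? header " ").getD []).filter (fun x => x != "") ≠ []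
instance (header : String) (value_line : String) : Decidable (Pre_get_values_py header value_line) := by
  unfold Pre_get_values_py; infer_instance

def pvWitness_get_values_py : String × String := ("AID  SEV", "1    MAJ")

def Spec_get_values_py (header : String) (value_line : String) (out : List (String × String)) : Prop :=
  out = get_values_py_alt header value_line
instance (header : String) (value_line : String) (out : List (String × String)) : Decidable (Spec_get_values_py header value_line out) := by unfold Spec_get_values_py; infer_instance

-- ===== CLAIM (what is proved, stated in full; the proofs are below) =====
def Claim_equal_get_values_py : Prop := ∀ (header : String) (value_line : String), Dom_get_values_py header value_line → Pre_get_values_py header value_line → Spec_get_values_py header value_line (get_values_py header value_line)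

-- ===== LEMMAS AND PROOFS =====

-- A's Int pyRange loop is the same as a Nat range loop over token pairs.
lemma pv_A_loop {σ : Type} (step : σ → String → String → σ) :
    ∀ (ts : List String) (d : σ),
      (PySem.List.pyRange 0 ((ts.length : Int) - 1) 1).foldl
        (fun d it => step d (PySem.List.pyGetD ts it "") (PySem.List.pyGetD ts (it + 1) "")) d
      = (List.range (ts.length - 1)).foldl
        (fun d i => step d (ts.getD i "") (ts.getD (i + 1) "")) d := by
  intro ts d
  cases ts with
  | nil => simp
  | cons t ts' =>
    have h : ((t :: ts').length : Int) - 1 = (((t :: ts').length - 1 : Nat) : Int) := by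
      simp
    rw [h, PySem.List.pyRange_zero_natCast, List.foldl_map]
    simp only [← Nat.cast_add_one, PySem.List.pyGetD_natCast]

-- the Nat range loop over token pairs is the zip-of-consecutive-tokens loop.
lemma pv_range_zip {σ : Type} (step : σ → String → String → σ) :
    ∀ (ts : List String) (d : σ),
      (List.range (ts.length - 1)).foldl
        (fun d i => step d (ts.getD i "") (ts.getD (i + 1) "")) d
      = (ts.zip ts.tail).foldl (fun d p => step d p.1 p.2) d := by
  intro ts
  induction ts with
  | nil => intro d; simp
  | cons t ts' ih =>
    intro d
    cases ts' with
    | nil => simp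
    | cons t2 rest =>
      rw [show (t :: t2 :: rest).length - 1 = (t2 :: rest).length - 1 + 1 from by
            simp,
          List.range_succ_eq_map, List.foldl_cons, List.foldl_map]
      simp only [List.getD_cons_zero, List.getD_cons_succ, Nat.succ_eq_add_one]
      exact ih _

-- B's recursive pair list, in closed form: one pair per consecutive-token pair,
-- then the final token's tail slice.
lemma pv_pairs (header value_line : String) :
    ∀ (ts : List String) (t : String),
      pairsAlt header value_line (t :: ts)
      = ((t :: ts).zip ts).map (fun p =>
            (p.1, PySem.Str.strip (PySem.Str.slice value_line
              (some (PySem.Str.find header p.1)) (some (PySem.Str.find header p.2)))))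
        ++ [((t :: ts).getLast (List.cons_ne_nil t ts),
             PySem.Str.strip (PySem.Str.slice value_line
               (some (PySem.Str.find header ((t :: ts).getLast (List.cons_ne_nil t ts)))) none))] := by
  intro ts
  induction ts with
  | nil => intro t; simp [pairsAlt]
  | cons t2 rest ih =>
    intro t
    rw [pairsAlt, ih t2]
    simp [List.getLast_cons]

-- ===== VERDICT (by name: the statement is the Claim_ definition above) =====
theorem get_values_py_spec : Claim_equal_get_values_py := by
  intro header value_line _ hpre
  unfold Spec_get_values_py get_values_py get_values_py_alt
  set ts := ((PySem.Str.split? header " ").getD []).filter (fun x => x != "") with hts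
  have hne : ts ≠ [] := hpre
  clear_value ts
  obtain ⟨t, ts', rfl⟩ : ∃ t ts', ts = t :: ts' := by
    cases h : ts with
    | nil => exact absurd h hne
    | cons a l => exact ⟨a, l, rfl⟩
  simp only [PySem.Dict.ofList, PySem.Dict.update]
  rw [pv_pairs, List.foldl_append, List.foldl_cons, List.foldl_nil,
      PySem.List.pyGetD_neg_one _ _ hne, List.foldl_map]
  congr 2
  exact ((pv_A_loop (fun d a b =>
      d.insert a (PySem.Str.strip (PySem.Str.slice value_line
        (some (PySem.Str.find header a)) (some (PySem.Str.find header b))))) (t :: ts')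
      PySem.Dict.empty).trans
    (pv_range_zip (fun d a b =>
      d.insert a (PySem.Str.strip (PySem.Str.slice value_line
        (some (PySem.Str.find header a)) (some (PySem.Str.find header b))))) (t :: ts')
      PySem.Dict.empty))
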